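-- pv_equiv track=rewrite | github.com/sazzadrupak/python_exercise | count_abbas.py | count_abbas
-- ===== SOURCE A (Python) =====
-- def count_abbas(string):
--     abba_count = 0
--     counter = 0
--     for i in string:
--         if i == 'a':
--             if string[counter:(counter + 4)] == 'abba':
--                 abba_count += 1
--         counter += 1
--     return abba_count
-- ===== SOURCE B (Python) =====
-- def count_abbas(string):
--     count = 0
--     pos = 0
--     while True:
--         idx = string.find('abba', pos)
--         if idx == -1:
--             return count
--         count += 1
--         pos = idx + 1
-- ===== Notes on version B (the rewrite author's own statement) =====
-- stated objective: faster
-- what changed: Replaces the per-character Python loop that slice-compares at each candidate position with a str.find loop that jumps from match to match (advancing the start by one to keep overlaps), moving the scan into the C-level string search.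
import Mathlib
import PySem

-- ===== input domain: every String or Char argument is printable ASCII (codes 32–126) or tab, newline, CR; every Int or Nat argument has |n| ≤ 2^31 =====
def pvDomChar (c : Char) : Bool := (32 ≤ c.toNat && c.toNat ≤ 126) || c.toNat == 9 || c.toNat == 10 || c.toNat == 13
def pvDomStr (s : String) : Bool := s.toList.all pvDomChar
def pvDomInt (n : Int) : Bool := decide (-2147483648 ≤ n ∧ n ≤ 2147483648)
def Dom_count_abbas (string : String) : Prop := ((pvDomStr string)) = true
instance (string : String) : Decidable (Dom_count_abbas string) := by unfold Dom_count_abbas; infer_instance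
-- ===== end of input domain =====

-- B replaces A's per-character scan (slice-compare at candidate positions) by a str.find loop jumping
-- from match to match; same return value on every string (measured faster in a timing run).

-- ===== PORT A =====
-- for i in string: if i == 'a' and string[counter:counter+4] == 'abba': count += 1; counter += 1
def count_abbas (string : String) : Int :=
  (string.toList.foldl
    (fun (st : Int × Int) i =>
      ((if i = 'a' then
          (if PySem.List.slice string.toList (some st.2) (some (st.2 + 4)) = ['a', 'b', 'b', 'a']
           then st.1 + 1 else st.1)
        else st.1),
       st.2 + 1))
    (0, 0)).1

-- ===== PORT B =====
-- termination fact for B's find loop: a successful find lies in [pos, length)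
theorem pv_findFrom_bounds (cs : List Char) (pos : Nat)
    (h : PySem.Chars.findFrom cs ['a', 'b', 'b', 'a'] (pos : Int) none ≠ -1) :
    pos ≤ (PySem.Chars.findFrom cs ['a', 'b', 'b', 'a'] (pos : Int) none).toNat ∧
      (PySem.Chars.findFrom cs ['a', 'b', 'b', 'a'] (pos : Int) none).toNat < cs.length := by
  have hple : pos ≤ cs.length := by
    by_contra hgt
    apply h
    simp only [PySem.Chars.findFrom]
    have h1 : ¬ ((pos : Int) < 0) := by omega
    simp [h1]
    omega
  obtain ⟨h1, h2, _⟩ := PySem.Chars.findFrom_natCast_spec cs ['a', 'b', 'b', 'a'] pos hple h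
  constructor
  · omega
  · have hne : List.drop (PySem.Chars.findFrom cs ['a', 'b', 'b', 'a'] (pos : Int) none).toNat cs ≠ [] := by
      intro hnil
      rw [hnil] at h2
      simp at h2
    rw [ne_eq, List.drop_eq_nil_iff] at hne
    omega

-- while True: idx = string.find('abba', pos); if idx == -1: return count; count += 1; pos = idx + 1
def countAbbasFind (cs : List Char) (pos : Nat) (count : Int) : Int :=
  if _h : PySem.Chars.findFrom cs ['a', 'b', 'b', 'a'] (pos : Int) none = -1 then count
  else countAbbasFind cs ((PySem.Chars.findFrom cs ['a', 'b', 'b', 'a'] (pos : Int) none).toNat + 1) (count + 1)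
termination_by cs.length + 1 - pos
decreasing_by
  have := pv_findFrom_bounds cs pos _h
  omega

def count_abbas_alt (string : String) : Int :=
  countAbbasFind string.toList 0 0

-- ===== PRECONDITION & SPEC =====
def Spec_count_abbas (string : String) (out : Int) : Prop := out = count_abbas_alt string
instance (string : String) (out : Int) : Decidable (Spec_count_abbas string out) := by unfold Spec_count_abbas; infer_instance

-- ===== CLAIM (what is proved, stated in full; the proofs are below) =====
def Claim_equal_count_abbas : Prop := ∀ (string : String), Dom_count_abbas string → Spec_count_abbas string (count_abbas string)

-- ===== LEMMAS AND PROOFS =====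

-- number of indices i in [pos, length) at which 'abba' starts
def abbaCount (cs : List Char) (pos : Nat) : Nat :=
  (List.range' pos (cs.length - pos)).countP (fun i => decide (['a', 'b', 'b', 'a'] <+: cs.drop i))

theorem abbaCount_of_len_le (cs : List Char) (pos : Nat) (h : cs.length ≤ pos) :
    abbaCount cs pos = 0 := by
  unfold abbaCount
  rw [Nat.sub_eq_zero_of_le h]
  simp

theorem abbaCount_succ (cs : List Char) (k : Nat) (h : k < cs.length) :
    abbaCount cs k =
      abbaCount cs (k + 1) + (if ['a', 'b', 'b', 'a'] <+: cs.drop k then 1 else 0) := by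
  unfold abbaCount
  have hlen : cs.length - k = (cs.length - (k + 1)) + 1 := by omega
  rw [hlen, List.range'_succ, List.countP_cons]
  simp

-- A's branch at index k equals the "'abba' starts at k" test, given the looped char heads cs.drop k
theorem pv_cond_eq (cs : List Char) (k : Nat) (x : Char) (t : List Char)
    (hx : cs.drop k = x :: t) (c : Int) :
    (if x = 'a' then
        (if PySem.List.slice cs (some (k : Int)) (some ((k : Int) + 4)) = ['a', 'b', 'b', 'a']
         then c + 1 else c)
      else c)
    = (if ['a', 'b', 'b', 'a'] <+: cs.drop k then c + 1 else c) := by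
  have h4 : ((k : Int) + 4) = (((k + 4 : Nat)) : Int) := by push_cast; ring
  have hslice : PySem.List.slice cs (some (k : Int)) (some ((k : Int) + 4)) = (cs.drop k).take 4 := by
    rw [h4, PySem.List.slice_natCast]
    congr 1
    omega
  have hiff : (cs.drop k).take 4 = ['a', 'b', 'b', 'a'] ↔ ['a', 'b', 'b', 'a'] <+: cs.drop k := by
    rw [List.prefix_iff_eq_take]
    constructor <;> (intro h; simpa using h.symm)
  rw [hslice]
  by_cases hp : ['a', 'b', 'b', 'a'] <+: cs.drop k
  · have hx' : x = 'a' := by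
      obtain ⟨u, hu⟩ := hp
      rw [hx] at hu
      injection hu with h1 _
      exact h1.symm
    rw [if_pos hx', if_pos (hiff.mpr hp), if_pos hp]
  · rw [if_neg hp]
    by_cases hx' : x = 'a'
    · rw [if_pos hx', if_neg (fun h => hp (hiff.mp h))]
    · rw [if_neg hx']

-- invariant of A's fold: iterating over cs.drop k with counter k adds abbaCount cs k
theorem pv_aLoop (cs : List Char) (l : List Char) (k : Nat) (c : Int) (hl : l = cs.drop k) :
    (l.foldl
      (fun (st : Int × Int) i =>
        ((if i = 'a' then
            (if PySem.List.slice cs (some st.2) (some (st.2 + 4)) = ['a', 'b', 'b', 'a']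
             then st.1 + 1 else st.1)
          else st.1),
         st.2 + 1))
      (c, (k : Int))).1 = c + (abbaCount cs k : Int) := by
  induction l generalizing k c with
  | nil =>
    have hk : cs.length ≤ k := List.drop_eq_nil_iff.mp hl.symm
    rw [abbaCount_of_len_le cs k hk]
    simp
  | cons x t ih =>
    have hk : k < cs.length := by
      by_contra hge
      have hnil : cs.drop k = [] := List.drop_eq_nil_iff.mpr (by omega)
      rw [hnil] at hl
      simp at hl
    have ht : t = cs.drop (k + 1) := by
      have htl := List.tail_drop (l := cs) (i := k)
      rw [← hl] at htl
      simpa using htl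
    simp only [List.foldl_cons]
    rw [pv_cond_eq cs k x t hl.symm c]
    have hcast : ((k : Int) + 1) = ((k + 1 : Nat) : Int) := by push_cast; ring
    rw [hcast, ih (k + 1) _ ht]
    rw [abbaCount_succ cs k hk]
    by_cases hp : ['a', 'b', 'b', 'a'] <+: cs.drop k
    · rw [if_pos hp, if_pos hp]; push_cast; ring
    · rw [if_neg hp, if_neg hp]; push_cast; ring

-- invariant of B's find loop
theorem pv_bLoop (cs : List Char) (pos : Nat) (count : Int) :
    countAbbasFind cs pos count = count + (abbaCount cs pos : Int) := by
  induction pos, count using countAbbasFind.induct cs with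
  | case1 pos count hidx =>
    rw [countAbbasFind]
    simp only [dif_pos hidx]
    by_cases hple : pos ≤ cs.length
    · have hno : abbaCount cs pos = 0 := by
        unfold abbaCount
        rw [List.countP_eq_zero]
        intro i hi
        simp only [decide_eq_true_eq]
        intro hpre
        have hninf := (PySem.Chars.findFrom_natCast_eq_neg_one_iff cs ['a', 'b', 'b', 'a'] pos hple).mp hidx
        apply hninf
        have hmem := List.mem_range'.mp hi
        have hdd : cs.drop i = (cs.drop pos).drop (i - pos) := by
          rw [List.drop_drop]
          congr 1
          omega
        rw [hdd] at hpre
        exact hpre.isInfix.trans (List.drop_suffix (i - pos) (cs.drop pos)).isInfix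
      rw [hno]
      simp
    · rw [abbaCount_of_len_le cs pos (by omega)]
      simp
  | case2 pos count hidx ih =>
    rw [countAbbasFind]
    simp only [dif_neg hidx]
    have hb := pv_findFrom_bounds cs pos hidx
    have hple : pos ≤ cs.length := by omega
    obtain ⟨hge, hpre, hmin⟩ := PySem.Chars.findFrom_natCast_spec cs ['a', 'b', 'b', 'a'] pos hple hidx
    rw [ih]
    have hsplit : abbaCount cs pos
        = abbaCount cs ((PySem.Chars.findFrom cs ['a', 'b', 'b', 'a'] (pos : Int) none).toNat + 1) + 1 := by
      set idxN := (PySem.Chars.findFrom cs ['a', 'b', 'b', 'a'] (pos : Int) none).toNat with hidxN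
      unfold abbaCount
      have h1 : List.range' pos (cs.length - pos)
          = List.range' pos (idxN - pos) ++ List.range' idxN (cs.length - idxN) := by
        have happ := List.range'_append (s := pos) (m := idxN - pos) (n := cs.length - idxN) (step := 1)
        rw [show pos + 1 * (idxN - pos) = idxN by omega] at happ
        rw [happ]
        congr 1
        omega
      rw [h1, List.countP_append]
      have hz : (List.range' pos (idxN - pos)).countP
          (fun i => decide (['a', 'b', 'b', 'a'] <+: cs.drop i)) = 0 := by
        rw [List.countP_eq_zero]
        intro i hi
        have hmem := List.mem_range'.mp hi
        simp only [decide_eq_true_eq]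
        exact hmin i (by omega) (by omega)
      have h2 : List.range' idxN (cs.length - idxN)
          = idxN :: List.range' (idxN + 1) (cs.length - (idxN + 1)) := by
        rw [show cs.length - idxN = (cs.length - (idxN + 1)) + 1 by omega, List.range'_succ]
      rw [hz, h2, List.countP_cons]
      simp [hpre]
    rw [hsplit]
    push_cast
    ring

-- ===== VERDICT (by name: the statement is the Claim_ definition above) =====
theorem count_abbas_spec : Claim_equal_count_abbas := by
  intro s _
  unfold Spec_count_abbas count_abbas count_abbas_alt
  rw [pv_bLoop s.toList 0 0]
  have ha := pv_aLoop s.toList s.toList 0 0 (by simp)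
  simpa using ha
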